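-- pv_equiv track=rewrite | github.com/luuhoanganhhuy/AI_ProjectB | your_team_name/player.py | find_explosion_groups
-- ===== SOURCE A (Python) =====
-- BOARD_SQUARES = {(x,y) for x in range(8) for y in range(8)}
--
-- BOOM_RADIUS = [(-1,+1), (+0,+1), (+1,+1),
--                (-1,+0),          (+1,+0),
--                (-1,-1), (+0,-1), (+1,-1)]
--
-- def around_square(xy):
--     """
--     Generate the list of squares surrounding a square
--     (those affected by a boom action).
--     """
--     x, y = xy
--     for dx, dy in BOOM_RADIUS:
--         square = x+dx, y+dy
--         if square in BOARD_SQUARES: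
--             yield square
--
-- def find_explosion_groups(targets):
--     """
--     Partition a set of targets into groups that will 'boom' together.
--     'targets' is a set of coordinate pairs. Return a set of frozensets
--     representing the partition.
--     """
--     # 'up' is a union-find tree-based data structure
--     up = {t: t for t in targets}
--     # find performs a root lookup with path compression in 'up'
--     def find(t):
--         if up[t] == t:
--             return t
--         top = find(up[t])
--         up[t] = top
--         return top
--     # run disjoint set formation algorithm to identify groups
--     for t in targets:
--         ttop = find(t)
--         for u in around_square(t):
--             if u in targets:
--                 utop = find(u)
--                 if ttop != utop:
--                     up[utop] = ttop
--     # convert disjoint set trees into Python sets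
--     groups = {}
--     for t in targets:
--         top = find(t)
--         if top in groups:
--             groups[top].add(t)
--         else:
--             groups[top] = {t}
--     # return the partition
--     return {frozenset(group) for group in groups.values()}
-- ===== SOURCE B (Python) =====
-- BOARD_SQUARES = {(x,y) for x in range(8) for y in range(8)}
--
-- BOOM_RADIUS = [(-1,+1), (+0,+1), (+1,+1),
--                (-1,+0),          (+1,+0),
--                (-1,-1), (+0,-1), (+1,-1)]
--
-- def around_square(xy):
--     """
--     Generate the list of squares surrounding a square
--     (those affected by a boom action).
--     """
--     x, y = xy
--     for dx, dy in BOOM_RADIUS: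
--         square = x+dx, y+dy
--         if square in BOARD_SQUARES:
--             yield square
--
-- def chained(a, b):
--     """
--     Two targets boom together when either square's explosion
--     reaches the other.
--     """
--     return b in around_square(a) or a in around_square(b)
--
-- def find_explosion_groups(targets):
--     """
--     Partition a set of targets into groups that will 'boom' together,
--     by iterative flood fill over the 'chained' relation.
--     """
--     # label each target with the number of its component
--     label = {}
--     fresh = 0
--     for t in targets:
--         if t in label:
--             continue
--         label[t] = fresh
--         stack = [t]
--         while stack:
--             sq = stack.pop()
--             for u in targets:
--                 if u not in label and chained(sq, u):
--                     label[u] = fresh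
--                     stack.append(u)
--         fresh += 1
--     # collect the groups
--     groups = {}
--     for t in targets:
--         groups.setdefault(label[t], set()).add(t)
--     return {frozenset(g) for g in groups.values()}
-- ===== Notes on version B (the rewrite author's own statement) =====
-- stated objective: alternative
-- what changed: Replaced the recursive union-find with path compression by an iterative stack-based flood fill that labels each connected component in one visit over the symmetric 'chained' relation (either square's boom reaches the other).
import Mathlib
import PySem

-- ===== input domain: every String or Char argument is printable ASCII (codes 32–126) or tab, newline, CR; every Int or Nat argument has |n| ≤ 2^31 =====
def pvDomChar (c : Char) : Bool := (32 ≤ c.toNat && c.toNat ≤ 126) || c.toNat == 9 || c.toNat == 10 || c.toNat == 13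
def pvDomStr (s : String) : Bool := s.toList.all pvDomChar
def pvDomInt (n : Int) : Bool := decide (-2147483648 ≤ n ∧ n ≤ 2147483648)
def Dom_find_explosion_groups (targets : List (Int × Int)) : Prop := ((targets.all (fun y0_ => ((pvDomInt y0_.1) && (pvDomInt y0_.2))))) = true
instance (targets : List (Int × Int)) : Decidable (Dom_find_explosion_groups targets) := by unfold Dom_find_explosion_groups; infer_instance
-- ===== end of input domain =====

-- B replaces A's recursive union-find (with path compression) by an iterative stack-based flood
-- fill over the symmetric 'chained' relation (objective: alternative; equal return values).

-- ===== PORT A =====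
-- BOARD_SQUARES = {(x,y) for x in range(8) for y in range(8)}
def BOARD_SQUARES : List (Int × Int) :=
  PySem.Set.ofList ((PySem.List.pyRange 0 8 1).flatMap (fun x => (PySem.List.pyRange 0 8 1).map (fun y => (x, y))))

def BOOM_RADIUS : List (Int × Int) :=
  [(-1, 1), (0, 1), (1, 1), (-1, 0), (1, 0), (-1, -1), (0, -1), (1, -1)]

-- generator around_square(xy), as the list of its yields
def around_square (xy : Int × Int) : List (Int × Int) :=
  BOOM_RADIUS.foldl (fun acc d =>
    let square := (xy.1 + d.1, xy.2 + d.2)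
    if square ∈ BOARD_SQUARES then acc ++ [square] else acc) []

-- find(t) with path compression; fuel only makes the recursion structural (it is never exhausted:
-- parent chains in 'up' are acyclic and stay inside its keys, so up.items.length + 1 steps suffice).
-- up[t] is ported as getD t t: t is always a key of 'up' at every call site.
def ufFind (fuel : Nat) (up : PySem.Dict (Int × Int) (Int × Int)) (t : Int × Int) :
    (Int × Int) × PySem.Dict (Int × Int) (Int × Int) :=
  match fuel with
  | 0 => (t, up)
  | fuel + 1 =>
    let p := up.getD t t
    if p = t then (t, up)
    else
      let r := ufFind fuel up p
      (r.1, r.2.insert t r.1)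

-- {frozenset(group) for group in …}: a set of frozensets — dedup by frozenset (i.e. set) equality,
-- first occurrences kept in insertion order (used by both ports' identical final line)
def pyFrozensetEq (a b : List (Int × Int)) : Bool := a.all (· ∈ b) && b.all (· ∈ a)

def pyFrozensetSet (gs : List (List (Int × Int))) : List (List (Int × Int)) :=
  gs.foldl (fun acc g => if acc.any (fun h => pyFrozensetEq h g) then acc else acc ++ [g]) []

def find_explosion_groups (targets : List (Int × Int)) : List (List (Int × Int)) :=
  -- up = {t: t for t in targets}
  let up0 := targets.foldl (fun d t => d.insert t t) (PySem.Dict.empty)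
  -- for t in targets: ttop = find(t); for u in around_square(t): if u in targets: …
  let up1 := targets.foldl (fun up t =>
    let f := ufFind (up.items.length + 1) up t
    (around_square t).foldl (fun up u =>
      if u ∈ targets then
        let g := ufFind (up.items.length + 1) up u
        if f.1 ≠ g.1 then g.2.insert g.1 f.1 else g.2
      else up) f.2) up0
  -- groups = {}; for t in targets: top = find(t); …
  let fin := targets.foldl
    (fun (st : PySem.Dict (Int × Int) (PySem.Set (Int × Int)) × PySem.Dict (Int × Int) (Int × Int)) t =>
      let f := ufFind (st.2.items.length + 1) st.2 t
      let groups := match st.1.get? f.1 with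
        | some g => st.1.insert f.1 (PySem.Set.add g t)
        | none   => st.1.insert f.1 (PySem.Set.ofList [t])
      (groups, f.2)) (PySem.Dict.empty, up1)
  pyFrozensetSet fin.1.values

-- ===== PORT B =====
-- chained(a, b): either square's explosion reaches the other
def chained (a b : Int × Int) : Bool :=
  decide (b ∈ around_square a) || decide (a ∈ around_square b)

-- while stack: sq = stack.pop(); for u in targets: …
-- fuel only makes the while loop structural (2*len(targets)+1 iterations always suffice:
-- every push labels a previously unlabelled target).
def bfsLoop (fuel : Nat) (targets : List (Int × Int)) (label : PySem.Dict (Int × Int) Int)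
    (fresh : Int) (stack : List (Int × Int)) : PySem.Dict (Int × Int) Int :=
  match fuel with
  | 0 => label
  | fuel + 1 =>
    match PySem.List.pop? stack (-1) with
    | none => label
    | some (c, rest) =>
      let step := targets.foldl
        (fun (st : PySem.Dict (Int × Int) Int × List (Int × Int)) u =>
          if st.1.contains u = false ∧ chained c u = true then
            (st.1.insert u fresh, st.2 ++ [u])
          else st) (label, rest)
      bfsLoop fuel targets step.1 fresh step.2

def find_explosion_groups_alt (targets : List (Int × Int)) : List (List (Int × Int)) :=
  -- label = {}; fresh = 0; for t in targets: flood fill from t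
  let st := targets.foldl
    (fun (st : PySem.Dict (Int × Int) Int × Int) t =>
      if st.1.contains t then st
      else (bfsLoop (2 * targets.length + 1) targets (st.1.insert t st.2) st.2 [t], st.2 + 1))
    (PySem.Dict.empty, 0)
  -- groups = {}; for t in targets: groups.setdefault(label[t], set()).add(t)
  let groups := targets.foldl
    (fun (g : PySem.Dict Int (PySem.Set (Int × Int))) t =>
      let c := st.1.getD t 0
      match g.get? c with
      | some s => g.insert c (PySem.Set.add s t)
      | none   => g.insert c (PySem.Set.ofList [t])) PySem.Dict.empty
  pyFrozensetSet groups.values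

-- ===== PRECONDITION & SPEC =====
-- 'targets' is a Python set of pairs; its Lean encoding is the list of its DISTINCT elements.
-- Pre_ only states that encoding's invariant: no duplicate elements.
def Pre_find_explosion_groups (targets : List (Int × Int)) : Prop := targets.Nodup
instance (targets : List (Int × Int)) : Decidable (Pre_find_explosion_groups targets) := by
  unfold Pre_find_explosion_groups; infer_instance

def pvWitness_find_explosion_groups : (List (Int × Int)) := [(0, 0), (1, 1), (4, 4), (7, 0)]

def Spec_find_explosion_groups (targets : List (Int × Int)) (out : List (List (Int × Int))) : Prop :=
  out = find_explosion_groups_alt targets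
instance (targets : List (Int × Int)) (out : List (List (Int × Int))) :
    Decidable (Spec_find_explosion_groups targets out) := by
  unfold Spec_find_explosion_groups; infer_instance

-- ===== CLAIM (what is proved, stated in full; the proofs are below) =====
def Claim_equal_find_explosion_groups : Prop := ∀ (targets : List (Int × Int)),
  Dom_find_explosion_groups targets → Pre_find_explosion_groups targets →
  Spec_find_explosion_groups targets (find_explosion_groups targets)

-- ===== LEMMAS AND PROOFS =====
lemma mem_around_fold (xy u : Int × Int) (l : List (Int × Int)) (acc : List (Int × Int)) :
    u ∈ l.foldl (fun acc d =>
        if (xy.1 + d.1, xy.2 + d.2) ∈ BOARD_SQUARES then acc ++ [(xy.1 + d.1, xy.2 + d.2)] else acc) acc ↔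
      u ∈ acc ∨ ((∃ d ∈ l, u = (xy.1 + d.1, xy.2 + d.2)) ∧ u ∈ BOARD_SQUARES) := by
  induction l generalizing acc with
  | nil => simp
  | cons d l ih =>
    simp only [List.foldl_cons]
    by_cases h : (xy.1 + d.1, xy.2 + d.2) ∈ BOARD_SQUARES
    · rw [if_pos h, ih]
      simp only [List.mem_append, List.mem_cons, List.not_mem_nil, or_false]
      aesop
    · rw [if_neg h, ih]
      simp only [List.mem_cons]
      constructor
      · rintro (h1 | ⟨⟨e, he, rfl⟩, hB⟩)
        · exact Or.inl h1
        · exact Or.inr ⟨⟨e, Or.inr he, rfl⟩, hB⟩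
      · rintro (h1 | ⟨⟨e, he2, rfl⟩, hB⟩)
        · exact Or.inl h1
        · rcases he2 with rfl | he
          · exact absurd hB h
          · exact Or.inr ⟨⟨e, he, rfl⟩, hB⟩

lemma mem_around (xy u : Int × Int) :
    u ∈ around_square xy ↔ (∃ d ∈ BOOM_RADIUS, u = (xy.1 + d.1, xy.2 + d.2)) ∧ u ∈ BOARD_SQUARES := by
  rw [around_square, mem_around_fold]
  simp

lemma neg_mem_BOOM {d : Int × Int} (h : d ∈ BOOM_RADIUS) : (-d.1, -d.2) ∈ BOOM_RADIUS := by
  fin_cases h <;> decide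

-- symmetric boom adjacency inside targets
def pvAdj (T : List (Int × Int)) (a b : Int × Int) : Prop :=
  a ∈ T ∧ b ∈ T ∧ (∃ d ∈ BOOM_RADIUS, b = (a.1 + d.1, a.2 + d.2)) ∧
    (b ∈ BOARD_SQUARES ∨ a ∈ BOARD_SQUARES)

def pvConn (T : List (Int × Int)) : Int × Int → Int × Int → Prop :=
  Relation.ReflTransGen (pvAdj T)

lemma pvAdj_symm {T a b} (h : pvAdj T a b) : pvAdj T b a := by
  obtain ⟨ha, hb, ⟨d, hd, rfl⟩, hbd⟩ := h
  refine ⟨hb, ha, ⟨(-d.1, -d.2), neg_mem_BOOM hd, ?_⟩, hbd.symm⟩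
  simp

lemma pvConn_symm {T a b} (h : pvConn T a b) : pvConn T b a :=
  (Relation.ReflTransGen.symmetric (fun _ _ h => pvAdj_symm h)) h

lemma pvAdj_conn {T a b} (h : pvAdj T a b) : pvConn T a b := Relation.ReflTransGen.single h

-- A's directed edge (t -> u, u in around_square t) generates the same closure
lemma pvAdj_iff_around {T a b} :
    pvAdj T a b ↔ (a ∈ T ∧ b ∈ T ∧ (b ∈ around_square a ∨ a ∈ around_square b)) := by
  constructor
  · rintro ⟨ha, hb, ⟨d, hd, rfl⟩, hbd⟩
    refine ⟨ha, hb, ?_⟩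
    rcases hbd with h | h
    · exact Or.inl ((mem_around _ _).2 ⟨⟨d, hd, rfl⟩, h⟩)
    · refine Or.inr ((mem_around _ _).2 ⟨⟨(-d.1, -d.2), neg_mem_BOOM hd, ?_⟩, h⟩)
      cases a; simp
  · rintro ⟨ha, hb, h | h⟩
    · obtain ⟨hd, hbB⟩ := (mem_around _ _).1 h
      exact ⟨ha, hb, hd, Or.inl hbB⟩
    · obtain ⟨⟨d, hd, rfl⟩, haB⟩ := (mem_around _ _).1 h
      refine ⟨ha, hb, ⟨(-d.1, -d.2), neg_mem_BOOM hd, ?_⟩, Or.inr haB⟩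
      simp

def pvAcyclic (p : (Int × Int) → (Int × Int)) : Prop := ∀ x k, 0 < k → p^[k] x = x → p x = x
def pvGood (T : List (Int × Int)) (p : (Int × Int) → (Int × Int)) : Prop :=
  (∀ x, p x ≠ x → x ∈ T ∧ p x ∈ T) ∧ pvAcyclic p
def pvRoot (n : Nat) (p : (Int × Int) → (Int × Int)) (x : Int × Int) : Int × Int := p^[n] x

lemma pvIter_mem {T p} (hg : pvGood T p) {x : Int × Int} (hx : x ∈ T) (k : Nat) : p^[k] x ∈ T := by
  induction k with
  | zero => simpa using hx
  | succ k ih =>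
    rw [Function.iterate_succ_apply']
    by_cases h : p (p^[k] x) = p^[k] x
    · rw [h]; exact ih
    · exact (hg.1 _ h).2

lemma pvStab {T : List (Int × Int)} {p} (hT : T.Nodup) (hg : pvGood T p) (x : Int × Int) :
    p (p^[T.length] x) = p^[T.length] x := by
  set n := T.length with hn
  by_cases hex : ∃ k, k ≤ n ∧ p (p^[k] x) = p^[k] x
  · obtain ⟨k, hk, hr⟩ := hex
    have : p^[n] x = p^[k] x := by
      have : n = (n - k) + k := by omega
      rw [this, Function.iterate_add_apply, Function.iterate_fixed hr]
    rw [this]; exact hr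
  · push_neg at hex
    exfalso
    -- all iterates up to n are movers: they lie in T and are pairwise distinct
    set L := (List.range (n + 1)).map (fun k => p^[k] x) with hL
    have hcyc : ∀ i j, i < j → j ≤ n → p^[i] x ≠ p^[j] x := by
      intro i j hij hj heq
      have h2 : p^[j - i] (p^[i] x) = p^[i] x := by
        rw [← Function.iterate_add_apply]
        have : j - i + i = j := by omega
        rw [this, ← heq]
      have := hg.2 _ (j - i) (by omega) h2
      exact hex i (by omega) this
    have hnd : L.Nodup := by
      refine List.Nodup.map_on ?_ (List.nodup_range)
      intro i hi j hj heq
      have hi' : i ≤ n := by have := List.mem_range.1 hi; omega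
      have hj' : j ≤ n := by have := List.mem_range.1 hj; omega
      rcases lt_trichotomy i j with h | h | h
      · exact absurd heq (hcyc i j h hj')
      · exact h
      · exact absurd heq.symm (hcyc j i h hi')
    have hsub : ∀ y ∈ L, y ∈ T := by
      intro y hy
      obtain ⟨k, hk, rfl⟩ := List.mem_map.1 hy
      have hk' : k ≤ n := by simpa using (List.mem_range.1 hk)
      exact (hg.1 _ (hex k (by omega))).1
    have hle := (List.subperm_of_subset hnd hsub).length_le
    simp [hL] at hle
    omega

lemma pvRoot_isRoot {T p} (hT : T.Nodup) (hg : pvGood T p) (x : Int × Int) :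
    p (pvRoot T.length p x) = pvRoot T.length p x := pvStab hT hg x

lemma pvRoot_fix {p x} (n : Nat) (h : p x = x) : pvRoot n p x = x := Function.iterate_fixed h n

lemma pvRoot_parent {T : List (Int × Int)} {p} (hT : T.Nodup) (hg : pvGood T p) (s : Int × Int) :
    pvRoot T.length p (p s) = pvRoot T.length p s := by
  show p^[T.length] (p s) = p^[T.length] s
  rw [← Function.iterate_succ_apply, Function.iterate_succ_apply']
  exact pvStab hT hg s

lemma pvRoot_mem {T p} (hg : pvGood T p) {x : Int × Int} (hx : x ∈ T) (n : Nat) :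
    pvRoot n p x ∈ T := pvIter_mem hg hx n

lemma pvUpdate_fix {p : (Int × Int) → (Int × Int)} {x r : Int × Int} (hr : p r = r) :
    Function.update p x r r = r := by
  by_cases h : r = x
  · subst h; simp
  · rw [Function.update_of_ne h]; exact hr

lemma pvUpdate_good {T : List (Int × Int)} {p} (hg : pvGood T p) {x r : Int × Int}
    (hr : p r = r) (hx : x ∈ T) (hrT : r ∈ T) : pvGood T (Function.update p x r) := by
  set p' := Function.update p x r with hp'
  constructor
  · intro y hy
    by_cases h : y = x
    · subst h
      refine ⟨hx, ?_⟩
      have : p' y = r := by simp [hp']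
      rw [this]; exact hrT
    · rw [hp', Function.update_of_ne h] at hy ⊢
      exact hg.1 _ hy
  · intro y k hk hcyc
    by_contra hne
    have hrfix : p' r = r := pvUpdate_fix hr
    by_cases hcase : ∃ j, j < k ∧ p'^[j] y = x
    · obtain ⟨j, hj, hjx⟩ := hcase
      have hj1 : p'^[j + 1] y = r := by
        rw [Function.iterate_succ_apply', hjx]; simp [hp']
      have : p'^[k] y = r := by
        have hsplit : k = (k - (j + 1)) + (j + 1) := by omega
        rw [hsplit, Function.iterate_add_apply, hj1, Function.iterate_fixed hrfix]
      rw [hcyc] at this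
      subst this
      exact hne hrfix
    · push_neg at hcase
      have hiter : ∀ j, j ≤ k → p'^[j] y = p^[j] y := by
        intro j hj
        induction j with
        | zero => simp
        | succ i ih =>
          rw [Function.iterate_succ_apply', Function.iterate_succ_apply',
            ih (by omega), hp', Function.update_of_ne]
          rw [← ih (by omega)]
          exact hcase i (by omega)
      have hpy : p y = y := by
        apply hg.2 y k hk
        rw [← hiter k le_rfl, hcyc]
      have hyx : y ≠ x := by
        have := hcase 0 hk
        simpa using this
      rw [hp', Function.update_of_ne hyx] at hne
      exact hne hpy

lemma pvRoot_ne_of_not_fix {T : List (Int × Int)} {p} (hT : T.Nodup) (hg : pvGood T p)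
    {x : Int × Int} (hpx : p x ≠ x) : pvRoot T.length p x ≠ x := by
  intro h
  apply hpx
  have := pvRoot_isRoot hT hg x
  rw [h] at this
  exact this

lemma pvUpdate_root {T : List (Int × Int)} {p} (hT : T.Nodup) (hg : pvGood T p) {x r : Int × Int}
    (hr : p r = r) (hx : x ∈ T) (hrT : r ∈ T)
    (hside : p x = x ∨ r = pvRoot T.length p x) (s : Int × Int) :
    pvRoot T.length (Function.update p x r) s =
      if pvRoot T.length p s = pvRoot T.length p x then r else pvRoot T.length p s := by
  have hg' := pvUpdate_good hg hr hx hrT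
  have hrfix' : Function.update p x r r = r := pvUpdate_fix hr
  have hn1 : 1 ≤ T.length := by
    cases T with
    | nil => simp at hx
    | cons a l => simp
  have base : ∀ s, p s = s →
      pvRoot T.length (Function.update p x r) s =
        if pvRoot T.length p s = pvRoot T.length p x then r else pvRoot T.length p s := by
    intro s hs
    by_cases hsx : s = x
    · subst hsx
      rw [if_pos rfl]
      show (Function.update p s r)^[T.length] s = r
      have hpx : Function.update p s r s = r := by simp
      conv_lhs => rw [show T.length = (T.length - 1) + 1 by omega]
      rw [Function.iterate_succ_apply, hpx, Function.iterate_fixed hrfix']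
    · have hs' : Function.update p x r s = s := by
        rw [Function.update_of_ne hsx]; exact hs
      rw [pvRoot_fix T.length hs', pvRoot_fix T.length hs]
      by_cases hcond : s = pvRoot T.length p x
      · rw [if_pos hcond]
        rcases hside with hroot | hreq
        · rw [pvRoot_fix T.length hroot] at hcond
          exact absurd hcond hsx
        · rw [hreq, hcond]
      · rw [if_neg hcond]
  have key : ∀ k s, p (p^[k] s) = p^[k] s →
      pvRoot T.length (Function.update p x r) s =
        if pvRoot T.length p s = pvRoot T.length p x then r else pvRoot T.length p s := by
    intro k
    induction k with
    | zero =>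
      intro s hs
      simp only [Function.iterate_zero, id_eq] at hs
      exact base s hs
    | succ k ih =>
      intro s hs
      by_cases hps : p s = s
      · exact base s hps
      · by_cases hsx : s = x
        · subst hsx
          rw [if_pos rfl]
          have hpx : Function.update p s r s = r := by simp
          have h1 : pvRoot T.length (Function.update p s r) s =
              pvRoot T.length (Function.update p s r) (Function.update p s r s) := by
            show (Function.update p s r)^[T.length] s =
              (Function.update p s r)^[T.length] (Function.update p s r s)
            rw [← Function.iterate_succ_apply, Function.iterate_succ_apply']
            exact (pvStab hT hg' s).symm
          rw [h1, hpx, pvRoot_fix T.length hrfix']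
        · have hstep : Function.update p x r s = p s := by
            rw [Function.update_of_ne hsx]
          have h1 : pvRoot T.length (Function.update p x r) s =
              pvRoot T.length (Function.update p x r) (p s) := by
            rw [← hstep]
            exact (pvRoot_parent hT hg' s).symm
          have hk : p (p^[k] (p s)) = p^[k] (p s) := by
            rw [← Function.iterate_succ_apply]; exact hs
          rw [h1, ih (p s) hk, pvRoot_parent hT hg s]
  exact key T.length s (pvStab hT hg s)

-- ===== dict-level bridging =====
def pvP (up : PySem.Dict (Int × Int) (Int × Int)) : (Int × Int) → (Int × Int) := fun x => up.getD x x

lemma pvP_insert (up : PySem.Dict (Int × Int) (Int × Int)) (x r : Int × Int) :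
    pvP (up.insert x r) = Function.update (pvP up) x r := by
  funext y
  simp only [pvP, PySem.Dict.getD_insert, Function.update_apply]

def pvUFInv (T : List (Int × Int)) (up : PySem.Dict (Int × Int) (Int × Int)) : Prop :=
  up.keys = T ∧ pvGood T (pvP up)

lemma pvUFInv_contains {T up} (h : pvUFInv T up) {x : Int × Int} (hx : x ∈ T) :
    up.contains x = true := by
  rw [PySem.Dict.contains_iff_mem_keys, h.1]; exact hx

lemma pvUFInv_insert {T up} (hInv : pvUFInv T up) {x r : Int × Int}
    (hx : x ∈ T) (hr : pvP up r = r) (hrT : r ∈ T) :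
    pvUFInv T (up.insert x r) := by
  refine ⟨?_, ?_⟩
  · rw [PySem.Dict.keys_insert_of_contains _ _ (pvUFInv_contains hInv hx)]
    exact hInv.1
  · rw [pvP_insert]
    exact pvUpdate_good hInv.2 hr hx hrT

lemma pvItems_len {T up} (h : pvUFInv T up) : up.items.length = T.length := by
  have : up.keys.length = T.length := by rw [h.1]
  simpa [PySem.Dict.keys] using this

-- find(t): returns the root, preserves the invariant, every root, and the fixpoint set
lemma ufFind_spec {T : List (Int × Int)} (hT : T.Nodup) :
    ∀ (fuel : Nat) (up : PySem.Dict (Int × Int) (Int × Int)) (t : Int × Int), pvUFInv T up →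
    (∃ k, k < fuel ∧ pvP up ((pvP up)^[k] t) = (pvP up)^[k] t) →
    (ufFind fuel up t).1 = pvRoot T.length (pvP up) t ∧
    pvUFInv T (ufFind fuel up t).2 ∧
    (∀ s, pvRoot T.length (pvP (ufFind fuel up t).2) s = pvRoot T.length (pvP up) s) ∧
    (∀ s, pvP (ufFind fuel up t).2 s = s ↔ pvP up s = s) := by
  intro fuel
  induction fuel with
  | zero =>
    intro up t hInv hex
    obtain ⟨k, hk, _⟩ := hex
    omega
  | succ fuel ih =>
    intro up t hInv hex
    have hstep : ufFind (fuel + 1) up t =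
        if up.getD t t = t then (t, up)
        else ((ufFind fuel up (up.getD t t)).1,
          (ufFind fuel up (up.getD t t)).2.insert t (ufFind fuel up (up.getD t t)).1) := rfl
    by_cases hpt : up.getD t t = t
    · have hres : ufFind (fuel + 1) up t = (t, up) := by rw [hstep, if_pos hpt]
      rw [hres]
      refine ⟨?_, hInv, fun s => rfl, fun s => Iff.rfl⟩
      exact (pvRoot_fix T.length (show pvP up t = t from hpt)).symm
    · have hres : ufFind (fuel + 1) up t =
          ((ufFind fuel up (up.getD t t)).1,
            (ufFind fuel up (up.getD t t)).2.insert t (ufFind fuel up (up.getD t t)).1) := by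
        rw [hstep, if_neg hpt]
      obtain ⟨k, hk, hkroot⟩ := hex
      have hk0 : k ≠ 0 := by
        rintro rfl
        simp only [Function.iterate_zero, id_eq] at hkroot
        exact hpt hkroot
      have hex' : ∃ k', k' < fuel ∧
          pvP up ((pvP up)^[k'] (up.getD t t)) = (pvP up)^[k'] (up.getD t t) := by
        have hks : k = (k - 1) + 1 := by omega
        rw [hks, Function.iterate_succ_apply] at hkroot
        exact ⟨k - 1, by omega, hkroot⟩
      obtain ⟨ih1, ih2, ih3, ih4⟩ := ih up (up.getD t t) hInv hex'
      set q := ufFind fuel up (up.getD t t) with hq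
      have hg := hInv.2
      have htT : t ∈ T := (hg.1 t hpt).1
      have hptT : pvP up t ∈ T := (hg.1 t hpt).2
      -- q.1 is the root of t
      have hq1 : q.1 = pvRoot T.length (pvP up) t := by
        rw [ih1]
        exact pvRoot_parent hT hg t
      -- q.1 is a fixpoint of pvP q.2, and lies in T
      have hq1fixp : pvP up q.1 = q.1 := by
        rw [hq1]; exact pvRoot_isRoot hT hg t
      have hq1fix : pvP q.2 q.1 = q.1 := (ih4 q.1).2 hq1fixp
      have hq1T : q.1 ∈ T := by rw [hq1]; exact pvRoot_mem hg htT T.length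
      have hside : pvP q.2 t = t ∨ q.1 = pvRoot T.length (pvP q.2) t := by
        right
        rw [ih3 t, hq1]
      have hg' := ih2.2
      rw [hres]
      refine ⟨hq1, pvUFInv_insert ih2 htT hq1fix hq1T, ?_, ?_⟩
      · intro s
        rw [pvP_insert, pvUpdate_root hT hg' hq1fix htT hq1T hside s, ih3 s, ih3 t]
        split_ifs with h
        · rw [hq1, h]
        · rfl
      · intro s
        rw [pvP_insert]
        by_cases hst : s = t
        · subst hst
          have hq1ne : q.1 ≠ s := by
            rw [hq1]
            exact pvRoot_ne_of_not_fix hT hg hpt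
          simp only [Function.update_self]
          constructor
          · intro h; exact absurd h hq1ne
          · intro h; exact absurd h hpt
        · rw [Function.update_of_ne hst]
          exact ih4 s

-- ===== A phase 1: up = {t: t for t in targets} =====
lemma pvUp0_getD (l : List (Int × Int)) (d : PySem.Dict (Int × Int) (Int × Int))
    (h : ∀ x, d.getD x x = x) :
    ∀ x, (l.foldl (fun d t => d.insert t t) d).getD x x = x := by
  induction l generalizing d with
  | nil => exact h
  | cons t l ih =>
    simp only [List.foldl_cons]
    refine ih _ ?_
    intro x
    rw [PySem.Dict.getD_insert]
    split_ifs with hx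
    · exact hx.symm
    · exact h x

lemma pvUp0_inv {T : List (Int × Int)} (hT : T.Nodup) :
    pvUFInv T (T.foldl (fun d t => d.insert t t) PySem.Dict.empty) ∧
    pvP (T.foldl (fun d t => d.insert t t) PySem.Dict.empty) = id := by
  have hP : pvP (T.foldl (fun d t => d.insert t t) PySem.Dict.empty) = id := by
    funext x
    exact pvUp0_getD T PySem.Dict.empty (fun x => by simp [PySem.Dict.getD_empty]) x
  refine ⟨⟨?_, ?_⟩, hP⟩
  · rw [PySem.Dict.keys_foldl_insert, PySem.Dict.keys_empty, PySem.Set.update_nil_left]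
    exact PySem.Set.ofList_eq_self_of_nodup T hT
  · rw [hP]
    exact ⟨fun x h => absurd rfl h, fun x k _ h => rfl⟩

lemma pvRoot_id (n : Nat) (x : Int × Int) : pvRoot n id x = x := by
  simp [pvRoot]

-- ===== A phase 2: the union loop (proof-land names for the port's loop bodies) =====
def pvInnerStep (T : List (Int × Int)) (ttop : Int × Int)
    (up : PySem.Dict (Int × Int) (Int × Int)) (u : Int × Int) :
    PySem.Dict (Int × Int) (Int × Int) :=
  if u ∈ T then
    let g := ufFind (up.items.length + 1) up u
    if ttop ≠ g.1 then g.2.insert g.1 ttop else g.2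
  else up

def pvStepA (T : List (Int × Int)) (up : PySem.Dict (Int × Int) (Int × Int)) (t : Int × Int) :
    PySem.Dict (Int × Int) (Int × Int) :=
  let f := ufFind (up.items.length + 1) up t
  (around_square t).foldl (pvInnerStep T f.1) f.2

lemma pvInnerStep_pos {T : List (Int × Int)} {u : Int × Int} (ttop : Int × Int)
    (up : PySem.Dict (Int × Int) (Int × Int)) (huT : u ∈ T) :
    pvInnerStep T ttop up u =
      if ttop ≠ (ufFind (up.items.length + 1) up u).1 then
        (ufFind (up.items.length + 1) up u).2.insert (ufFind (up.items.length + 1) up u).1 ttop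
      else (ufFind (up.items.length + 1) up u).2 := by
  simp [pvInnerStep, huT]

lemma pvInnerStep_neg {T : List (Int × Int)} {u : Int × Int} (ttop : Int × Int)
    (up : PySem.Dict (Int × Int) (Int × Int)) (huT : u ∉ T) :
    pvInnerStep T ttop up u = up := by
  simp [pvInnerStep, huT]

lemma pvInner_spec {T : List (Int × Int)} (hT : T.Nodup) (t ttop : Int × Int) (htT : t ∈ T)
    (httT : ttop ∈ T) :
    ∀ (us : List (Int × Int)) (up : PySem.Dict (Int × Int) (Int × Int)), pvUFInv T up →
    (∀ u ∈ us, u ∈ around_square t) →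
    pvP up ttop = ttop →
    pvRoot T.length (pvP up) t = ttop →
    (∀ a b, a ∈ T → b ∈ T → pvRoot T.length (pvP up) a = pvRoot T.length (pvP up) b →
      pvConn T a b) →
    (pvUFInv T (us.foldl (pvInnerStep T ttop) up) ∧
     pvP (us.foldl (pvInnerStep T ttop) up) ttop = ttop ∧
     pvRoot T.length (pvP (us.foldl (pvInnerStep T ttop) up)) t = ttop ∧
     (∀ a b, a ∈ T → b ∈ T →
       pvRoot T.length (pvP (us.foldl (pvInnerStep T ttop) up)) a =
         pvRoot T.length (pvP (us.foldl (pvInnerStep T ttop) up)) b → pvConn T a b) ∧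
     (∀ a b, pvRoot T.length (pvP up) a = pvRoot T.length (pvP up) b →
       pvRoot T.length (pvP (us.foldl (pvInnerStep T ttop) up)) a =
         pvRoot T.length (pvP (us.foldl (pvInnerStep T ttop) up)) b) ∧
     (∀ u ∈ us, u ∈ T →
       pvRoot T.length (pvP (us.foldl (pvInnerStep T ttop) up)) u = ttop)) := by
  intro us
  induction us with
  | nil =>
    intro up hInv hus hfix hroot hsound
    simp only [List.foldl_nil]
    exact ⟨hInv, hfix, hroot, hsound, fun a b h => h, by simp⟩
  | cons u us ih =>
    intro up hInv hus hfix hroot hsound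
    simp only [List.foldl_cons]
    by_cases huT : u ∈ T
    · rw [pvInnerStep_pos ttop up huT]
      have hfuel : ∃ k, k < up.items.length + 1 ∧
          pvP up ((pvP up)^[k] u) = (pvP up)^[k] u :=
        ⟨T.length, by rw [pvItems_len hInv]; omega, pvStab hT hInv.2 u⟩
      obtain ⟨hf1, hf2, hf3, hf4⟩ := ufFind_spec hT (up.items.length + 1) up u hInv hfuel
      set g := ufFind (up.items.length + 1) up u with hg
      have hg2fix : pvP g.2 ttop = ttop := (hf4 ttop).2 hfix
      have hg2roott : pvRoot T.length (pvP g.2) t = ttop := by rw [hf3]; exact hroot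
      have hg2sound : ∀ a b, a ∈ T → b ∈ T →
          pvRoot T.length (pvP g.2) a = pvRoot T.length (pvP g.2) b → pvConn T a b := by
        intro a b ha hb h
        rw [hf3, hf3] at h
        exact hsound a b ha hb h
      have hadj : pvAdj T t u := by
        rw [pvAdj_iff_around]
        exact ⟨htT, huT, Or.inl (hus u (by simp))⟩
      by_cases hne : ttop ≠ g.1
      · rw [if_pos hne]
        have hG := hf2.2
        have hg1fixup : pvP up g.1 = g.1 := by rw [hf1]; exact pvRoot_isRoot hT hInv.2 u
        have hg1fix : pvP g.2 g.1 = g.1 := (hf4 g.1).2 hg1fixup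
        have hg1T : g.1 ∈ T := by rw [hf1]; exact pvRoot_mem hInv.2 huT T.length
        have hform := fun s => pvUpdate_root hT hG hg2fix hg1T httT (Or.inl hg1fix) s
        have hg1root : pvRoot T.length (pvP g.2) g.1 = g.1 := pvRoot_fix _ hg1fix
        set s1 := g.2.insert g.1 ttop with hs1
        have hs1P : pvP s1 = Function.update (pvP g.2) g.1 ttop := pvP_insert g.2 g.1 ttop
        have hform' : ∀ s, pvRoot T.length (pvP s1) s =
            if pvRoot T.length (pvP g.2) s = g.1 then ttop
            else pvRoot T.length (pvP g.2) s := by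
          intro s
          rw [hs1P]
          rw [hform s, hg1root]
        have hInv1 : pvUFInv T s1 := pvUFInv_insert hf2 hg1T hg2fix httT
        have hfix1 : pvP s1 ttop = ttop := by
          rw [hs1P, Function.update_of_ne hne]
          exact hg2fix
        have hroott1 : pvRoot T.length (pvP s1) t = ttop := by
          rw [hform' t, hg2roott]
          rw [if_neg hne]
        have hrootu1 : pvRoot T.length (pvP s1) u = ttop := by
          rw [hform' u, hf3, hf1]
          rw [if_pos rfl]
        have hsound1 : ∀ a b, a ∈ T → b ∈ T →
            pvRoot T.length (pvP s1) a = pvRoot T.length (pvP s1) b → pvConn T a b := by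
          intro a b ha hb h
          rw [hform' a, hform' b] at h
          have hconn_u : ∀ c, c ∈ T → pvRoot T.length (pvP g.2) c = g.1 → pvConn T c u := by
            intro c hc hcr
            refine hg2sound c u hc huT ?_
            rw [hcr, hf3]
            exact hf1
          have hconn_t : ∀ c, c ∈ T → pvRoot T.length (pvP g.2) c = ttop → pvConn T c t := by
            intro c hc hcr
            refine hg2sound c t hc htT ?_
            rw [hcr, hg2roott]
          split_ifs at h with h1 h2 h2
          · exact (hconn_u a ha h1).trans (pvConn_symm (hconn_u b hb h2))
          · refine ((hconn_u a ha h1).trans (pvAdj_conn (pvAdj_symm hadj))).trans ?_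
            exact pvConn_symm (hconn_t b hb h.symm)
          · refine ((hconn_t a ha h).trans (pvAdj_conn hadj)).trans ?_
            exact pvConn_symm (hconn_u b hb h2)
          · exact hg2sound a b ha hb h
        have hmono1 : ∀ a b, pvRoot T.length (pvP up) a = pvRoot T.length (pvP up) b →
            pvRoot T.length (pvP s1) a = pvRoot T.length (pvP s1) b := by
          intro a b h
          rw [hform' a, hform' b, hf3, hf3, h]
        obtain ⟨c1, c2, c3, c4, c5, c6⟩ :=
          ih s1 hInv1 (fun v hv => hus v (by simp [hv])) hfix1 hroott1 hsound1
        refine ⟨c1, c2, c3, c4, ?_, ?_⟩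
        · intro a b h
          exact c5 a b (hmono1 a b h)
        · intro v hv hvT
          rcases List.mem_cons.1 hv with rfl | hv'
          · have := c5 v t (by rw [hrootu1, hroott1])
            rw [c3] at this
            exact this
          · exact c6 v hv' hvT
      · rw [if_neg hne]
        push_neg at hne
        have hrootu1 : pvRoot T.length (pvP g.2) u = ttop := by
          rw [hf3, ← hf1]
          exact hne.symm
        have hmono1 : ∀ a b, pvRoot T.length (pvP up) a = pvRoot T.length (pvP up) b →
            pvRoot T.length (pvP g.2) a = pvRoot T.length (pvP g.2) b := by
          intro a b h
          rw [hf3, hf3, h]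
        obtain ⟨c1, c2, c3, c4, c5, c6⟩ :=
          ih g.2 hf2 (fun v hv => hus v (by simp [hv])) hg2fix hg2roott hg2sound
        refine ⟨c1, c2, c3, c4, ?_, ?_⟩
        · intro a b h
          exact c5 a b (hmono1 a b h)
        · intro v hv hvT
          rcases List.mem_cons.1 hv with rfl | hv'
          · have := c5 v t (by rw [hrootu1, hg2roott])
            rw [c3] at this
            exact this
          · exact c6 v hv' hvT
    · rw [pvInnerStep_neg ttop up huT]
      obtain ⟨c1, c2, c3, c4, c5, c6⟩ :=
        ih up hInv (fun v hv => hus v (by simp [hv])) hfix hroot hsound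
      refine ⟨c1, c2, c3, c4, c5, ?_⟩
      intro v hv hvT
      rcases List.mem_cons.1 hv with rfl | hv'
      · exact absurd hvT huT
      · exact c6 v hv' hvT

-- the outer union loop over targets
lemma pvPhase2_spec {T : List (Int × Int)} (hT : T.Nodup) :
    ∀ (l : List (Int × Int)) (up : PySem.Dict (Int × Int) (Int × Int)),
    (∀ x ∈ l, x ∈ T) → pvUFInv T up →
    (∀ a b, a ∈ T → b ∈ T → pvRoot T.length (pvP up) a = pvRoot T.length (pvP up) b →
      pvConn T a b) →
    (pvUFInv T (l.foldl (pvStepA T) up) ∧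
     (∀ a b, a ∈ T → b ∈ T →
       pvRoot T.length (pvP (l.foldl (pvStepA T) up)) a =
         pvRoot T.length (pvP (l.foldl (pvStepA T) up)) b → pvConn T a b) ∧
     (∀ a b, pvRoot T.length (pvP up) a = pvRoot T.length (pvP up) b →
       pvRoot T.length (pvP (l.foldl (pvStepA T) up)) a =
         pvRoot T.length (pvP (l.foldl (pvStepA T) up)) b) ∧
     (∀ t ∈ l, ∀ u, u ∈ around_square t → u ∈ T →
       pvRoot T.length (pvP (l.foldl (pvStepA T) up)) u =
         pvRoot T.length (pvP (l.foldl (pvStepA T) up)) t)) := by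
  intro l
  induction l with
  | nil =>
    intro up _ hInv hsound
    exact ⟨hInv, hsound, fun a b h => h, by simp⟩
  | cons t l ih =>
    intro up hl hInv hsound
    have htT : t ∈ T := hl t (by simp)
    simp only [List.foldl_cons]
    have hfuel : ∃ k, k < up.items.length + 1 ∧
        pvP up ((pvP up)^[k] t) = (pvP up)^[k] t :=
      ⟨T.length, by rw [pvItems_len hInv]; omega, pvStab hT hInv.2 t⟩
    obtain ⟨hf1, hf2, hf3, hf4⟩ := ufFind_spec hT (up.items.length + 1) up t hInv hfuel
    have hstepA : pvStepA T up t =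
        (around_square t).foldl
          (pvInnerStep T (ufFind (up.items.length + 1) up t).1)
          (ufFind (up.items.length + 1) up t).2 := rfl
    rw [hstepA]
    set f := ufFind (up.items.length + 1) up t with hf
    have httT : f.1 ∈ T := by rw [hf1]; exact pvRoot_mem hInv.2 htT T.length
    have hfix : pvP f.2 f.1 = f.1 := by
      refine (hf4 f.1).2 ?_
      rw [hf1]; exact pvRoot_isRoot hT hInv.2 t
    have hroott : pvRoot T.length (pvP f.2) t = f.1 := by rw [hf3, hf1]
    have hsound2 : ∀ a b, a ∈ T → b ∈ T →
        pvRoot T.length (pvP f.2) a = pvRoot T.length (pvP f.2) b → pvConn T a b := by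
      intro a b ha hb h
      rw [hf3, hf3] at h
      exact hsound a b ha hb h
    obtain ⟨i1, i2, i3, i4, i5, i6⟩ := pvInner_spec hT t f.1 htT httT (around_square t) f.2
      hf2 (fun u hu => hu) hfix hroott hsound2
    set s1 := (around_square t).foldl (pvInnerStep T f.1) f.2 with hs1
    obtain ⟨o1, o2, o3, o4⟩ := ih s1 (fun x hx => hl x (by simp [hx])) i1 i4
    refine ⟨o1, o2, ?_, ?_⟩
    · intro a b h
      refine o3 a b (i5 a b ?_)
      rw [hf3, hf3]
      exact h
    · intro t' ht' u hu huT
      rcases List.mem_cons.1 ht' with rfl | ht''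
      · exact o3 u t' (by rw [i6 u hu huT, i3])
      · exact o4 t' ht'' u hu huT

-- completeness: connected targets end up with equal roots
lemma pvConn_imp_root {T : List (Int × Int)} {R : (Int × Int) → (Int × Int)}
    (hedge : ∀ t ∈ T, ∀ u, u ∈ around_square t → u ∈ T → R u = R t) :
    ∀ a b, pvConn T a b → R a = R b := by
  intro a b h
  induction h with
  | refl => rfl
  | tail _ hadj ih =>
    rename_i b' c _
    rw [ih]
    rcases pvAdj_iff_around.1 hadj with ⟨hb', hc, h1 | h1⟩
    · exact (hedge b' hb' c h1 hc).symm
    · exact hedge c hc b' h1 hb'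

-- ===== A phase 3: grouping by find(t) is grouping by a pure key =====
def pvGBStep {κ : Type} [BEq κ] [LawfulBEq κ] (k : (Int × Int) → κ)
    (g : PySem.Dict κ (PySem.Set (Int × Int))) (t : Int × Int) :
    PySem.Dict κ (PySem.Set (Int × Int)) :=
  match g.get? (k t) with
  | some s => g.insert (k t) (PySem.Set.add s t)
  | none   => g.insert (k t) (PySem.Set.ofList [t])

def pvStep3 (st : PySem.Dict (Int × Int) (PySem.Set (Int × Int)) ×
    PySem.Dict (Int × Int) (Int × Int)) (t : Int × Int) :
    PySem.Dict (Int × Int) (PySem.Set (Int × Int)) × PySem.Dict (Int × Int) (Int × Int) :=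
  let f := ufFind (st.2.items.length + 1) st.2 t
  (match st.1.get? f.1 with
    | some g => st.1.insert f.1 (PySem.Set.add g t)
    | none   => st.1.insert f.1 (PySem.Set.ofList [t]), f.2)

lemma pvPhase3A {T : List (Int × Int)} (hT : T.Nodup) (K : (Int × Int) → (Int × Int)) :
    ∀ (l : List (Int × Int)) (G : PySem.Dict (Int × Int) (PySem.Set (Int × Int)))
      (up : PySem.Dict (Int × Int) (Int × Int)),
    pvUFInv T up → (∀ s, pvRoot T.length (pvP up) s = K s) →
    (l.foldl pvStep3 (G, up)).1 = l.foldl (pvGBStep K) G := by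
  intro l
  induction l with
  | nil => intro G up _ _; rfl
  | cons t l ih =>
    intro G up hInv hK
    simp only [List.foldl_cons]
    have hfuel : ∃ k, k < up.items.length + 1 ∧
        pvP up ((pvP up)^[k] t) = (pvP up)^[k] t :=
      ⟨T.length, by rw [pvItems_len hInv]; omega, pvStab hT hInv.2 t⟩
    obtain ⟨hf1, hf2, hf3, _⟩ := ufFind_spec hT (up.items.length + 1) up t hInv hfuel
    have hred : pvStep3 (G, up) t =
        ((match G.get? ((ufFind (up.items.length + 1) up t).1) with
          | some g => G.insert (ufFind (up.items.length + 1) up t).1 (PySem.Set.add g t)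
          | none   => G.insert (ufFind (up.items.length + 1) up t).1 (PySem.Set.ofList [t])),
         (ufFind (up.items.length + 1) up t).2) := rfl
    rw [hred]
    have hf1K : (ufFind (up.items.length + 1) up t).1 = K t := by rw [hf1, hK t]
    rw [hf1K]
    have hgb : pvGBStep K G t =
        (match G.get? (K t) with
          | some s => G.insert (K t) (PySem.Set.add s t)
          | none   => G.insert (K t) (PySem.Set.ofList [t])) := rfl
    rw [← hgb]
    exact ih (pvGBStep K G t) (ufFind (up.items.length + 1) up t).2 hf2
      (fun s => by rw [hf3 s, hK s])


def pvExt (l0 l : PySem.Dict (Int × Int) Int) (fresh : Int) : Prop :=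
  (∀ x, x ∈ l0.keys → l.get? x = l0.get? x) ∧
  (∀ x, x ∈ l.keys → x ∉ l0.keys → l.get? x = some fresh) ∧
  (∀ x, x ∈ l0.keys → x ∈ l.keys)

lemma pvExt_refl (l : PySem.Dict (Int × Int) Int) (fresh : Int) : pvExt l l fresh :=
  ⟨fun _ _ => rfl, fun x hx hx' => absurd hx hx', fun _ h => h⟩

lemma pvExt_trans {l0 l1 l2 : PySem.Dict (Int × Int) Int} {fresh : Int}
    (h1 : pvExt l0 l1 fresh) (h2 : pvExt l1 l2 fresh) : pvExt l0 l2 fresh := by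
  refine ⟨?_, ?_, fun x hx => h2.2.2 x (h1.2.2 x hx)⟩
  · intro x hx
    rw [h2.1 x (h1.2.2 x hx), h1.1 x hx]
  · intro x hx hx0
    by_cases h : x ∈ l1.keys
    · rw [h2.1 x h]
      exact h1.2.1 x h hx0
    · exact h2.2.1 x hx h

lemma pvMem_keys_iff_contains (l : PySem.Dict (Int × Int) Int) (x : Int × Int) :
    x ∈ l.keys ↔ l.contains x = true := (PySem.Dict.contains_iff_mem_keys _ _).symm

lemma pvExt_insert (l : PySem.Dict (Int × Int) Int) {u : Int × Int} (hu : u ∉ l.keys)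
    (fresh : Int) : pvExt l (l.insert u fresh) fresh := by
  refine ⟨?_, ?_, ?_⟩
  · intro x hx
    exact PySem.Dict.get?_insert_of_ne l fresh (fun h => hu (by rw [← h]; exact hx))
  · intro x hx hx0
    rcases (PySem.Dict.mem_keys_insert _ _ _ _).1 hx with rfl | h
    · exact PySem.Dict.get?_insert_self _ _ _
    · exact absurd h hx0
  · intro x hx
    exact (PySem.Dict.mem_keys_insert _ _ _ _).2 (Or.inr hx)

lemma pvFilter_dec {T : List (Int × Int)} {keys keys' : List (Int × Int)} {u : Int × Int}
    (huT : u ∈ T) (hu : u ∉ keys)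
    (hk : ∀ x, x ∈ keys' ↔ x = u ∨ x ∈ keys) :
    (T.filter (fun x => decide (x ∉ keys'))).length + 1 ≤
      (T.filter (fun x => decide (x ∉ keys))).length := by
  have h1 : T.filter (fun x => decide (x ∉ keys')) =
      (T.filter (fun x => decide (x ∉ keys))).filter (fun x => decide (x ≠ u)) := by
    rw [List.filter_filter]
    apply List.filter_congr
    intro x _
    have hx := hk x
    by_cases h1 : x = u
    · subst h1
      have hm : x ∈ keys' := hx.2 (Or.inl rfl)
      simp [hm]
    · by_cases h2 : x ∈ keys
      · have hm : x ∈ keys' := hx.2 (Or.inr h2)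
        simp [hm, h1, h2]
      · have hm : x ∉ keys' := fun h => ((hx.1 h).elim (fun e => h1 e) (fun e => h2 e))
        simp [hm, h1, h2]
  rw [h1]
  have hmem : u ∈ T.filter (fun x => decide (x ∉ keys)) := by
    rw [List.mem_filter]
    simp [huT, hu]
  have := List.length_filter_lt_length_iff_exists (l := T.filter (fun x => decide (x ∉ keys)))
    (p := fun x => decide (x ≠ u))
  have hlt : ((T.filter (fun x => decide (x ∉ keys))).filter (fun x => decide (x ≠ u))).length <
      (T.filter (fun x => decide (x ∉ keys))).length := by
    rw [this]
    exact ⟨u, hmem, by simp⟩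
  omega

lemma chained_iff (a b : Int × Int) :
    chained a b = true ↔ (b ∈ around_square a ∨ a ∈ around_square b) := by
  simp [chained]

-- B's inner for-loop body (for u in targets), in proof-land
def pvStepB (c : Int × Int) (fresh : Int)
    (st : PySem.Dict (Int × Int) Int × List (Int × Int)) (u : Int × Int) :
    PySem.Dict (Int × Int) Int × List (Int × Int) :=
  if st.1.contains u = false ∧ chained c u = true then
    (st.1.insert u fresh, st.2 ++ [u])
  else st

lemma pvScan_spec (T : List (Int × Int)) (fresh : Int) (c : Int × Int) :
    ∀ (us : List (Int × Int)) (label : PySem.Dict (Int × Int) Int) (q : List (Int × Int)),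
    (∀ x ∈ us, x ∈ T) →
    (pvExt label (us.foldl (pvStepB c fresh) (label, q)).1 fresh ∧
     (∀ x, x ∈ (us.foldl (pvStepB c fresh) (label, q)).1.keys → x ∈ label.keys ∨
       (x ∈ T ∧ chained c x = true)) ∧
     (∀ x, x ∈ (us.foldl (pvStepB c fresh) (label, q)).2 → x ∈ q ∨
       (x ∈ (us.foldl (pvStepB c fresh) (label, q)).1.keys ∧ x ∉ label.keys)) ∧
     (∀ u ∈ us, chained c u = true → u ∈ (us.foldl (pvStepB c fresh) (label, q)).1.keys) ∧
     ((∀ x ∈ q, x ∈ label.keys) → q.Nodup →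
       ((us.foldl (pvStepB c fresh) (label, q)).2.Nodup ∧
        ∀ x ∈ (us.foldl (pvStepB c fresh) (label, q)).2,
          x ∈ (us.foldl (pvStepB c fresh) (label, q)).1.keys)) ∧
     (2 * (T.filter (fun x => decide (x ∉ (us.foldl (pvStepB c fresh) (label, q)).1.keys))).length +
        (us.foldl (pvStepB c fresh) (label, q)).2.length ≤
      2 * (T.filter (fun x => decide (x ∉ label.keys))).length + q.length) ∧
     (∀ x, x ∈ (us.foldl (pvStepB c fresh) (label, q)).1.keys → x ∉ label.keys →
       x ∈ (us.foldl (pvStepB c fresh) (label, q)).2) ∧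
     (∀ x ∈ q, x ∈ (us.foldl (pvStepB c fresh) (label, q)).2)) := by
  intro us
  induction us with
  | nil =>
    intro label q _
    simp only [List.foldl_nil]
    exact ⟨pvExt_refl label fresh, fun x hx => Or.inl hx, fun x hx => Or.inl hx,
      by simp, fun hq hnd => ⟨hnd, fun x hx => hq x hx⟩, le_rfl,
      fun x hx hx' => absurd hx hx', fun x hx => hx⟩
  | cons u us ih =>
    intro label q hus
    have huT : u ∈ T := hus u (by simp)
    have hus' : ∀ x ∈ us, x ∈ T := fun x hx => hus x (by simp [hx])
    simp only [List.foldl_cons]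
    by_cases hcond : label.contains u = false ∧ chained c u = true
    · have hstep : pvStepB c fresh (label, q) u = (label.insert u fresh, q ++ [u]) := by
        simp only [pvStepB]; rw [if_pos hcond]
      simp only [hstep]
      have hunk : u ∉ label.keys := by
        rw [pvMem_keys_iff_contains, hcond.1]
        simp
      have hkeys1 : ∀ x, x ∈ (label.insert u fresh).keys ↔ x = u ∨ x ∈ label.keys :=
        fun x => PySem.Dict.mem_keys_insert _ _ _ _
      obtain ⟨c1, c2, c3, c4, c5, c6, c7, c8⟩ := ih (label.insert u fresh) (q ++ [u]) hus'
      have hext : pvExt label (us.foldl (pvStepB c fresh) (label.insert u fresh, q ++ [u])).1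
          fresh := pvExt_trans (pvExt_insert label hunk fresh) c1
      refine ⟨hext, ?_, ?_, ?_, ?_, ?_, ?_, ?_⟩
      · intro x hx
        rcases c2 x hx with hx1 | hx1
        · rcases (hkeys1 x).1 hx1 with rfl | hx2
          · exact Or.inr ⟨huT, hcond.2⟩
          · exact Or.inl hx2
        · exact Or.inr hx1
      · intro x hx
        rcases c3 x hx with hx1 | hx1
        · rcases List.mem_append.1 hx1 with hx2 | hx2
          · exact Or.inl hx2
          · simp only [List.mem_singleton] at hx2
            subst hx2
            exact Or.inr ⟨c1.2.2 x ((hkeys1 x).2 (Or.inl rfl)), hunk⟩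
        · refine Or.inr ⟨hx1.1, fun hx2 => hx1.2 ((hkeys1 x).2 (Or.inr hx2))⟩
      · intro u' hu' hch
        rcases List.mem_cons.1 hu' with rfl | hu''
        · exact c1.2.2 _ ((hkeys1 _).2 (Or.inl rfl))
        · exact c4 u' hu'' hch
      · intro hq hnd
        refine c5 ?_ ?_
        · intro x hx
          rcases List.mem_append.1 hx with hx1 | hx1
          · exact (hkeys1 x).2 (Or.inr (hq x hx1))
          · simp only [List.mem_singleton] at hx1
            subst hx1
            exact (hkeys1 x).2 (Or.inl rfl)
        · rw [List.nodup_append]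
          refine ⟨hnd, List.nodup_singleton _, ?_⟩
          intro x hx1 y hy2
          simp only [List.mem_singleton] at hy2
          subst hy2
          exact fun he => hunk (he ▸ hq x hx1)
      · have hdrop := pvFilter_dec huT hunk hkeys1
        have hlen : (q ++ [u]).length = q.length + 1 := by simp
        omega
      · intro x hx hx0
        by_cases hxl : x ∈ (label.insert u fresh).keys
        · rcases (hkeys1 x).1 hxl with rfl | hx2
          · exact c8 _ (by simp)
          · exact absurd hx2 hx0
        · exact c7 x hx hxl
      · intro x hx
        exact c8 x (by simp [hx])
    · have hstep : pvStepB c fresh (label, q) u = (label, q) := by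
        simp only [pvStepB]; rw [if_neg hcond]
      simp only [hstep]
      obtain ⟨c1, c2, c3, c4, c5, c6, c7, c8⟩ := ih label q hus'
      refine ⟨c1, c2, c3, ?_, c5, c6, c7, c8⟩
      intro u' hu' hch
      rcases List.mem_cons.1 hu' with rfl | hu''
      · -- condition failed but chained: contains must be true
        have hcont : label.contains u' = true := by
          cases h : label.contains u'
          · exact absurd ⟨h, hch⟩ hcond
          · rfl
        exact c1.2.2 _ ((pvMem_keys_iff_contains _ _).2 hcont)
      · exact c4 u' hu'' hch

lemma pvConn_closed {T : List (Int × Int)} {K : List (Int × Int)}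
    (hcl : ∀ a ∈ K, ∀ u, pvAdj T a u → u ∈ K) :
    ∀ x y, pvConn T x y → x ∈ K → y ∈ K := by
  intro x y h hx
  induction h with
  | refl => exact hx
  | tail _ hadj ih => exact hcl _ ih _ hadj

lemma pvBfs_spec {T : List (Int × Int)} {t : Int × Int} {l0 : PySem.Dict (Int × Int) Int}
    {fresh : Int} (htT : t ∈ T) :
    ∀ (fuel : Nat) (label : PySem.Dict (Int × Int) Int) (stack : List (Int × Int)),
    pvExt l0 label fresh →
    (∀ x, x ∈ label.keys → x ∉ l0.keys → x ∈ T ∧ pvConn T t x) →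
    (∀ x ∈ stack, x ∈ label.keys ∧ x ∉ l0.keys) →
    stack.Nodup →
    (∀ x, x ∈ label.keys → x ∉ l0.keys → x ∉ stack → ∀ u, pvAdj T x u → u ∈ label.keys) →
    2 * (T.filter (fun x => decide (x ∉ label.keys))).length + stack.length ≤ fuel →
    (pvExt l0 (bfsLoop fuel T label fresh stack) fresh ∧
     (∀ x, x ∈ (bfsLoop fuel T label fresh stack).keys → x ∉ l0.keys →
       x ∈ T ∧ pvConn T t x) ∧
     (∀ x, x ∈ (bfsLoop fuel T label fresh stack).keys → x ∉ l0.keys →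
       ∀ u, pvAdj T x u → u ∈ (bfsLoop fuel T label fresh stack).keys) ∧
     (∀ x, x ∈ label.keys → x ∈ (bfsLoop fuel T label fresh stack).keys)) := by
  intro fuel
  induction fuel with
  | zero =>
    intro label stack hE hA1 hA2 hA2' hA3 hF
    have hstack : stack = [] := by
      cases stack with
      | nil => rfl
      | cons a s => simp at hF
    subst hstack
    exact ⟨hE, hA1, fun x hx hx0 => hA3 x hx hx0 (by simp), fun x hx => hx⟩
  | succ fuel ih =>
    intro label stack hE hA1 hA2 hA2' hA3 hF
    cases hstack : stack with
    | nil =>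
      subst hstack
      have : bfsLoop (fuel + 1) T label fresh [] = label := rfl
      rw [this]
      exact ⟨hE, hA1, fun x hx hx0 => hA3 x hx hx0 (by simp), fun x hx => hx⟩
    | cons a s =>
      subst hstack
      have hne : (a :: s) ≠ ([] : List (Int × Int)) := by simp
      set c := (a :: s).getLast hne with hc
      set rest := (a :: s).dropLast with hrest
      have hsplit : a :: s = rest ++ [c] := by
        rw [hrest, hc]
        exact (List.dropLast_append_getLast hne).symm
      have hpop : PySem.List.pop? (a :: s) (-1) = some (c, rest) := by
        rw [hsplit]
        exact PySem.List.pop?_last rest c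
      have hunfold : bfsLoop (fuel + 1) T label fresh (a :: s) =
          bfsLoop fuel T (T.foldl (pvStepB c fresh) (label, rest)).1 fresh
            (T.foldl (pvStepB c fresh) (label, rest)).2 := by
        have h1 : bfsLoop (fuel + 1) T label fresh (a :: s) =
            (match PySem.List.pop? (a :: s) (-1) with
              | none => label
              | some (c, rest) =>
                bfsLoop fuel T (T.foldl (pvStepB c fresh) (label, rest)).1 fresh
                  (T.foldl (pvStepB c fresh) (label, rest)).2) := rfl
        rw [h1, hpop]
      rw [hunfold]
      have hcmem : c ∈ a :: s := by rw [hsplit]; simp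
      have hcK : c ∈ label.keys := (hA2 c hcmem).1
      have hcl0 : c ∉ l0.keys := (hA2 c hcmem).2
      have hcT : c ∈ T := (hA1 c hcK hcl0).1
      have hcConn : pvConn T t c := (hA1 c hcK hcl0).2
      have hrestnd : rest.Nodup := by
        have := hA2'
        rw [hsplit] at this
        exact (List.nodup_append.1 this).1
      have hrestsub : ∀ x ∈ rest, x ∈ label.keys := by
        intro x hx
        exact (hA2 x (by rw [hsplit]; exact List.mem_append.2 (Or.inl hx))).1
      obtain ⟨s1, s2, s3, s4, s5, s6, s7, s8⟩ :=
        pvScan_spec T fresh c T label rest (fun x hx => hx)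
      set res := T.foldl (pvStepB c fresh) (label, rest) with hres
      obtain ⟨snd, ssub⟩ := s5 hrestsub hrestnd
      -- new keys are boom-adjacent to c
      have hnewadj : ∀ x, x ∈ res.1.keys → x ∉ label.keys → pvAdj T c x := by
        intro x hx hx0
        rcases s2 x hx with h | h
        · exact absurd h hx0
        · exact pvAdj_iff_around.2 ⟨hcT, h.1, (chained_iff c x).1 h.2⟩
      refine ?_
      have happly := ih res.1 res.2 (pvExt_trans hE s1) ?_ ?_ snd ?_ ?_
      · obtain ⟨r1, r2, r3, r4⟩ := happly
        exact ⟨r1, r2, r3, fun x hx => r4 x (s1.2.2 x hx)⟩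
      · -- A1 for the new state
        intro x hx hx0
        by_cases hxl : x ∈ label.keys
        · exact hA1 x hxl hx0
        · have hadj := hnewadj x hx hxl
          exact ⟨hadj.2.1, hcConn.trans (pvAdj_conn hadj)⟩
      · -- stack ⊆ keys ∖ l0.keys
        intro x hx
        rcases s3 x hx with h | h
        · exact ⟨s1.2.2 x (hrestsub x h), (hA2 x (by rw [hsplit]; exact List.mem_append.2 (Or.inl h))).2⟩
        · exact ⟨h.1, fun hx0 => h.2 (hE.2.2 x hx0)⟩
      · -- A3 for the new state
        intro x hx hx0 hxs u hadj
        by_cases hxl : x ∈ label.keys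
        · by_cases hxc : x = c
          · subst hxc
            obtain ⟨_, huT, hor⟩ := pvAdj_iff_around.1 hadj
            exact s4 u huT ((chained_iff c u).2 hor)
          · have hxold : x ∉ (a :: s) := by
              intro hmem
              rw [hsplit] at hmem
              rcases List.mem_append.1 hmem with h | h
              · exact hxs (s8 x h)
              · simp only [List.mem_singleton] at h
                exact hxc h
            exact s1.2.2 u (hA3 x hxl hx0 hxold u hadj)
        · exact absurd (s7 x hx hxl) hxs
      · -- the fuel bound
        have hlen : (a :: s).length = rest.length + 1 := by
          rw [hsplit]; simp
        have := s6
        omega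

def pvStepOuter (T : List (Int × Int)) (st : PySem.Dict (Int × Int) Int × Int) (t : Int × Int) :
    PySem.Dict (Int × Int) Int × Int :=
  if st.1.contains t then st
  else (bfsLoop (2 * T.length + 1) T (st.1.insert t st.2) st.2 [t], st.2 + 1)

def pvW (T : List (Int × Int)) (label : PySem.Dict (Int × Int) Int) (fresh : Int) : Prop :=
  (∀ x ∈ label.keys, x ∈ T) ∧
  (∀ x ∈ label.keys, ∀ u, pvAdj T x u → u ∈ label.keys) ∧
  (∀ x y, x ∈ label.keys → y ∈ label.keys → label.getD x 0 = label.getD y 0 → pvConn T x y) ∧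
  (∀ x y, x ∈ label.keys → y ∈ label.keys → pvAdj T x y → label.getD x 0 = label.getD y 0) ∧
  (∀ x ∈ label.keys, ∃ v, label.get? x = some v ∧ v < fresh)

lemma pvOuterB {T : List (Int × Int)} :
    ∀ (l : List (Int × Int)) (label : PySem.Dict (Int × Int) Int) (fresh : Int),
    (∀ x ∈ l, x ∈ T) → pvW T label fresh →
    (pvW T (l.foldl (pvStepOuter T) (label, fresh)).1 (l.foldl (pvStepOuter T) (label, fresh)).2 ∧
     (∀ x ∈ label.keys, x ∈ (l.foldl (pvStepOuter T) (label, fresh)).1.keys) ∧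
     (∀ t ∈ l, t ∈ (l.foldl (pvStepOuter T) (label, fresh)).1.keys)) := by
  intro l
  induction l with
  | nil =>
    intro label fresh _ hW
    exact ⟨hW, fun x hx => hx, by simp⟩
  | cons t l ih =>
    intro label fresh hl hW
    have htT : t ∈ T := hl t (by simp)
    simp only [List.foldl_cons]
    by_cases htK : label.contains t
    · have hstepO : pvStepOuter T (label, fresh) t = (label, fresh) := by
        simp only [pvStepOuter]; rw [if_pos htK]
      simp only [hstepO]
      obtain ⟨o1, o2, o3⟩ := ih label fresh (fun x hx => hl x (by simp [hx])) hW
      refine ⟨o1, o2, ?_⟩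
      intro t' ht'
      rcases List.mem_cons.1 ht' with rfl | h
      · exact o2 t' ((PySem.Dict.contains_iff_mem_keys _ _).1 htK)
      · exact o3 t' h
    · have hstepO : pvStepOuter T (label, fresh) t =
          (bfsLoop (2 * T.length + 1) T (label.insert t fresh) fresh [t], fresh + 1) := by
        simp only [pvStepOuter]; rw [if_neg htK]
      simp only [hstepO]
      have htnK : t ∉ label.keys := fun h =>
        htK ((PySem.Dict.contains_iff_mem_keys _ _).2 h)
      have hdisj : ∀ x, pvConn T t x → x ∉ label.keys := by
        intro x hconn hx
        exact htnK (pvConn_closed hW.2.1 x t (pvConn_symm hconn) hx)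
      have htins : t ∈ (label.insert t fresh).keys :=
        (PySem.Dict.mem_keys_insert _ _ _ _).2 (Or.inl rfl)
      obtain ⟨r1, r2, r3, r4⟩ := pvBfs_spec htT (2 * T.length + 1) (label.insert t fresh) [t]
        (pvExt_insert label htnK fresh)
        (by
          intro x hx hx0
          rcases (PySem.Dict.mem_keys_insert _ _ _ _).1 hx with rfl | h
          · exact ⟨htT, Relation.ReflTransGen.refl⟩
          · exact absurd h hx0)
        (by
          intro x hx
          simp only [List.mem_singleton] at hx
          subst hx
          exact ⟨htins, htnK⟩)
        (List.nodup_singleton t)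
        (by
          intro x hx hx0 hxs u hadj
          rcases (PySem.Dict.mem_keys_insert _ _ _ _).1 hx with rfl | h
          · exact absurd (by simp : x ∈ [x]) hxs
          · exact absurd h hx0)
        (by
          have h1 : (T.filter (fun x => decide (x ∉ (label.insert t fresh).keys))).length ≤
              T.length := List.length_filter_le _ _
          simp only [List.length_singleton]
          omega)
      set L1 := bfsLoop (2 * T.length + 1) T (label.insert t fresh) fresh [t] with hL1
      have htL1 : t ∈ L1.keys := r4 t htins
      -- the whole component of t is now labelled
      have hcomp : ∀ x, pvConn T t x → x ∈ L1.keys := by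
        intro x hconn
        induction hconn with
        | refl => exact htL1
        | tail hc hadj ihh =>
          rename_i b' c'
          exact r3 b' ihh (hdisj b' hc) c' hadj
      -- labels: get? on L1
      have hval : ∀ x, x ∈ L1.keys → (x ∈ label.keys ∧ L1.get? x = label.get? x) ∨
          (x ∉ label.keys ∧ L1.get? x = some fresh ∧ x ∈ T ∧ pvConn T t x) := by
        intro x hx
        by_cases hxl : x ∈ label.keys
        · exact Or.inl ⟨hxl, r1.1 x hxl⟩
        · exact Or.inr ⟨hxl, r1.2.1 x hx hxl, r2 x hx hxl⟩
      have hWnew : pvW T L1 (fresh + 1) := by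
        refine ⟨?_, ?_, ?_, ?_, ?_⟩
        · intro x hx
          rcases hval x hx with ⟨h1, _⟩ | ⟨_, _, h3, _⟩
          · exact hW.1 x h1
          · exact h3
        · intro x hx u hadj
          rcases hval x hx with ⟨h1, _⟩ | ⟨h1, _⟩
          · exact r1.2.2 u (hW.2.1 x h1 u hadj)
          · exact r3 x hx h1 u hadj
        · intro x y hx hy heq
          rcases hval x hx with ⟨hx1, hx2⟩ | ⟨hx1, hx2, hxT, hxC⟩ <;>
            rcases hval y hy with ⟨hy1, hy2⟩ | ⟨hy1, hy2, hyT, hyC⟩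
          · refine hW.2.2.1 x y hx1 hy1 ?_
            rw [PySem.Dict.getD_eq_get?_getD, PySem.Dict.getD_eq_get?_getD, ← hx2, ← hy2]
            exact heq
          · obtain ⟨v, hv, hvlt⟩ := hW.2.2.2.2 x hx1
            rw [PySem.Dict.getD_eq_get?_getD, PySem.Dict.getD_eq_get?_getD, hx2, hv, hy2] at heq
            simp only [Option.getD_some] at heq
            omega
          · obtain ⟨v, hv, hvlt⟩ := hW.2.2.2.2 y hy1
            rw [PySem.Dict.getD_eq_get?_getD, PySem.Dict.getD_eq_get?_getD, hx2, hy2, hv] at heq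
            simp only [Option.getD_some] at heq
            omega
          · exact (pvConn_symm hxC).trans hyC
        · intro x y hx hy hadj
          rcases hval x hx with ⟨hx1, hx2⟩ | ⟨hx1, hx2, hxT, hxC⟩ <;>
            rcases hval y hy with ⟨hy1, hy2⟩ | ⟨hy1, hy2, hyT, hyC⟩
          · rw [PySem.Dict.getD_eq_get?_getD, PySem.Dict.getD_eq_get?_getD, hx2, hy2]
            have := hW.2.2.2.1 x y hx1 hy1 hadj
            rw [PySem.Dict.getD_eq_get?_getD, PySem.Dict.getD_eq_get?_getD] at this
            exact this
          · exact absurd (hW.2.1 x hx1 y hadj) hy1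
          · exact absurd (hW.2.1 y hy1 x (pvAdj_symm hadj)) hx1
          · rw [PySem.Dict.getD_eq_get?_getD, PySem.Dict.getD_eq_get?_getD, hx2, hy2]
        · intro x hx
          rcases hval x hx with ⟨hx1, hx2⟩ | ⟨hx1, hx2, _⟩
          · obtain ⟨v, hv, hvlt⟩ := hW.2.2.2.2 x hx1
            exact ⟨v, by rw [hx2, hv], by omega⟩
          · exact ⟨fresh, hx2, by omega⟩
      obtain ⟨o1, o2, o3⟩ := ih L1 (fresh + 1) (fun x hx => hl x (by simp [hx])) hWnew
      refine ⟨o1, ?_, ?_⟩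
      · intro x hx
        exact o2 x (r4 x ((PySem.Dict.mem_keys_insert _ _ _ _).2 (Or.inr hx)))
      · intro t' ht'
        rcases List.mem_cons.1 ht' with rfl | h
        · exact o2 t' htL1
        · exact o3 t' h

-- ===== grouping: the values of the groups dict depend only on the classes of the key =====
def pvReps {κ : Type} [DecidableEq κ] (k : (Int × Int) → κ) (l : List (Int × Int)) :
    List (Int × Int) :=
  l.foldl (fun acc t => if ∃ r ∈ acc, k r = k t then acc else acc ++ [t]) []

lemma pvReps_append {κ : Type} [DecidableEq κ] (k : (Int × Int) → κ) (l : List (Int × Int))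
    (t : Int × Int) :
    pvReps k (l ++ [t]) =
      if ∃ r ∈ pvReps k l, k r = k t then pvReps k l else pvReps k l ++ [t] := by
  simp [pvReps, List.foldl_append]

lemma pvReps_sub {κ : Type} [DecidableEq κ] (k : (Int × Int) → κ) (l : List (Int × Int)) :
    ∀ r ∈ pvReps k l, r ∈ l := by
  induction l using List.reverseRecOn with
  | nil => simp [pvReps]
  | append_singleton l t ih =>
    rw [pvReps_append]
    split_ifs with h
    · intro r hr
      exact List.mem_append.2 (Or.inl (ih r hr))
    · intro r hr
      rcases List.mem_append.1 hr with h1 | h1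
      · exact List.mem_append.2 (Or.inl (ih r h1))
      · exact List.mem_append.2 (Or.inr h1)

lemma pvReps_class {κ : Type} [DecidableEq κ] (k : (Int × Int) → κ) (l : List (Int × Int)) :
    ∀ u ∈ l, ∃ r ∈ pvReps k l, k r = k u := by
  induction l using List.reverseRecOn with
  | nil => simp
  | append_singleton l t ih =>
    rw [pvReps_append]
    split_ifs with h
    · intro u hu
      rcases List.mem_append.1 hu with h1 | h1
      · exact ih u h1
      · simp only [List.mem_singleton] at h1
        subst h1
        exact h
    · intro u hu
      rcases List.mem_append.1 hu with h1 | h1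
      · obtain ⟨r, hr, hk⟩ := ih u h1
        exact ⟨r, List.mem_append.2 (Or.inl hr), hk⟩
      · simp only [List.mem_singleton] at h1
        subst h1
        exact ⟨u, List.mem_append.2 (Or.inr (by simp)), rfl⟩

lemma pvReps_keys_nodup {κ : Type} [DecidableEq κ] (k : (Int × Int) → κ)
    (l : List (Int × Int)) : ((pvReps k l).map k).Nodup := by
  induction l using List.reverseRecOn with
  | nil => simp [pvReps]
  | append_singleton l t ih =>
    rw [pvReps_append]
    split_ifs with h
    · exact ih
    · rw [List.map_append, List.nodup_append]
      refine ⟨ih, by simp, ?_⟩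
      intro a ha b hb
      simp only [List.map_singleton, List.mem_singleton] at hb
      subst hb
      obtain ⟨r, hr, rfl⟩ := List.mem_map.1 ha
      intro heq
      exact h ⟨r, hr, heq⟩

lemma pvGB_items {κ : Type} [BEq κ] [LawfulBEq κ] [DecidableEq κ] (k : (Int × Int) → κ) :
    ∀ (l q : List (Int × Int)) (G : PySem.Dict κ (PySem.Set (Int × Int))),
    (q ++ l).Nodup →
    G.items = (pvReps k q).map (fun r => (k r, q.filter (fun u => decide (k u = k r)))) →
    (l.foldl (pvGBStep k) G).items =
      (pvReps k (q ++ l)).map (fun r => (k r, (q ++ l).filter (fun u => decide (k u = k r)))) := by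
  intro l
  induction l with
  | nil =>
    intro q G hnd hG
    simpa using hG
  | cons t l ih =>
    intro q G hnd hG
    have htq : t ∉ q := by
      intro h
      have := List.nodup_append.1 hnd
      exact (this.2.2 t h t (by simp)) rfl
    have hkeys : G.keys = (pvReps k q).map k := by
      show G.items.map (·.1) = _
      rw [hG, List.map_map]
      rfl
    have hkeysnd : G.keys.Nodup := by rw [hkeys]; exact pvReps_keys_nodup k q
    simp only [List.foldl_cons]
    by_cases hex : ∃ r ∈ pvReps k q, k r = k t
    · obtain ⟨r0, hr0, hkr0⟩ := hex
      have hmem : ((k t : κ), q.filter (fun u => decide (k u = k t))) ∈ G.items := by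
        rw [hG]
        refine List.mem_map.2 ⟨r0, hr0, ?_⟩
        rw [hkr0]
      have hget : G.get? (k t) = some (q.filter (fun u => decide (k u = k t))) :=
        PySem.Dict.get?_of_mem_items G hmem hkeysnd
      have hstep : pvGBStep k G t =
          G.insert (k t) (PySem.Set.add (q.filter (fun u => decide (k u = k t))) t) := by
        simp only [pvGBStep, hget]
      have hadd : PySem.Set.add (q.filter (fun u => decide (k u = k t))) t =
          q.filter (fun u => decide (k u = k t)) ++ [t] :=
        PySem.Set.add_of_not_mem (fun h => htq (List.mem_of_mem_filter h))
      have hcont : G.contains (k t) = true := by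
        rw [PySem.Dict.contains_iff_mem_keys, hkeys]
        exact List.mem_map.2 ⟨r0, hr0, hkr0⟩
      have hitems1 : (pvGBStep k G t).items =
          (pvReps k q).map (fun r =>
            if k r = k t then (k t, q.filter (fun u => decide (k u = k t)) ++ [t])
            else (k r, q.filter (fun u => decide (k u = k r)))) := by
        rw [hstep, hadd, PySem.Dict.items_insert_of_contains G _ hcont, hG, List.map_map]
        apply List.map_congr_left
        intro r hr
        simp only [Function.comp]
        by_cases hkr : k r = k t
        · rw [if_pos (by simp [hkr]), if_pos hkr]
        · rw [if_neg (by simp [hkr]), if_neg hkr]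
      have hitems2 : (pvGBStep k G t).items =
          (pvReps k (q ++ [t])).map (fun r =>
            (k r, (q ++ [t]).filter (fun u => decide (k u = k r)))) := by
        rw [pvReps_append, if_pos ⟨r0, hr0, hkr0⟩, hitems1]
        apply List.map_congr_left
        intro r hr
        rw [List.filter_append]
        by_cases hkr : k r = k t
        · rw [if_pos hkr]
          have : [t].filter (fun u => decide (k u = k r)) = [t] := by
            simp [hkr.symm]
          rw [this]
          have : q.filter (fun u => decide (k u = k r)) =
              q.filter (fun u => decide (k u = k t)) :=
            List.filter_congr (fun u _ => by rw [hkr])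
          rw [this, hkr]
        · rw [if_neg hkr]
          have : [t].filter (fun u => decide (k u = k r)) = [] := by
            simp
            exact fun h => hkr h.symm
          rw [this, List.append_nil]
      have := ih (q ++ [t]) (pvGBStep k G t) (by simpa using hnd) hitems2
      rw [this]
      simp
    · have hget : G.get? (k t) = none := by
        rw [PySem.Dict.get?_eq_none_iff_not_mem_keys, hkeys]
        intro h
        obtain ⟨r, hr, hkr⟩ := List.mem_map.1 h
        exact hex ⟨r, hr, hkr⟩
      have hstep : pvGBStep k G t = G.insert (k t) (PySem.Set.ofList [t]) := by
        simp only [pvGBStep, hget]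
      have hso : PySem.Set.ofList [t] = [t] :=
        PySem.Set.ofList_eq_self_of_nodup [t] (by simp)
      have hcont : G.contains (k t) = false := by
        cases h : G.contains (k t)
        · rfl
        · rw [PySem.Dict.contains_iff_mem_keys, hkeys] at h
          obtain ⟨r, hr, hkr⟩ := List.mem_map.1 h
          exact absurd ⟨r, hr, hkr⟩ hex
      have hqt : q.filter (fun u => decide (k u = k t)) = [] := by
        rw [List.filter_eq_nil_iff]
        intro u hu
        simp only [decide_eq_true_eq]
        intro hk
        obtain ⟨r, hr, hkr⟩ := pvReps_class k q u hu
        exact hex ⟨r, hr, by rw [hkr, hk]⟩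
      have hitems2 : (pvGBStep k G t).items =
          (pvReps k (q ++ [t])).map (fun r =>
            (k r, (q ++ [t]).filter (fun u => decide (k u = k r)))) := by
        rw [hstep, hso, PySem.Dict.items_insert_of_not_contains G _ hcont, hG]
        rw [pvReps_append, if_neg hex, List.map_append]
        congr 1
        · apply List.map_congr_left
          intro r hr
          rw [List.filter_append]
          have : [t].filter (fun u => decide (k u = k r)) = [] := by
            simp
            intro h
            exact hex ⟨r, hr, h.symm⟩
          rw [this, List.append_nil]
        · simp only [List.map_singleton]
          rw [List.filter_append, hqt]
          simp
      have := ih (q ++ [t]) (pvGBStep k G t) (by simpa using hnd) hitems2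
      rw [this]
      simp

lemma pvConn_imp_eq {α : Type} {T : List (Int × Int)} {R : (Int × Int) → α}
    (hcomp : ∀ x y, x ∈ T → y ∈ T → pvAdj T x y → R x = R y) :
    ∀ a b, pvConn T a b → R a = R b := by
  intro a b h
  induction h with
  | refl => rfl
  | tail _ hadj ih => exact ih.trans (hcomp _ _ hadj.1 hadj.2.1 hadj)

lemma pvGB_values {κ : Type} [BEq κ] [LawfulBEq κ] [DecidableEq κ] (k : (Int × Int) → κ)
    (l : List (Int × Int)) (hnd : l.Nodup) :
    (l.foldl (pvGBStep k) PySem.Dict.empty).values =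
      (pvReps k l).map (fun r => l.filter (fun u => decide (k u = k r))) := by
  have h := pvGB_items k l [] PySem.Dict.empty (by simpa) (by simp [pvReps]; rfl)
  rw [List.nil_append] at h
  show (l.foldl (pvGBStep k) PySem.Dict.empty).items.map (·.2) = _
  rw [h, List.map_map]
  rfl

lemma pvReps_congr {κ1 κ2 : Type} [DecidableEq κ1] [DecidableEq κ2]
    (k1 : (Int × Int) → κ1) (k2 : (Int × Int) → κ2) (l : List (Int × Int))
    (hagree : ∀ a ∈ l, ∀ b ∈ l, (k1 a = k1 b ↔ k2 a = k2 b)) :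
    pvReps k1 l = pvReps k2 l := by
  induction l using List.reverseRecOn with
  | nil => rfl
  | append_singleton l t ih =>
    have hsub : ∀ a ∈ l, a ∈ l ++ [t] := fun a ha => List.mem_append.2 (Or.inl ha)
    have ih' := ih (fun a ha b hb => hagree a (hsub a ha) b (hsub b hb))
    rw [pvReps_append, pvReps_append, ← ih']
    have hiff : (∃ r ∈ pvReps k1 l, k1 r = k1 t) ↔ (∃ r ∈ pvReps k1 l, k2 r = k2 t) := by
      constructor
      · rintro ⟨r, hr, h⟩
        exact ⟨r, hr, (hagree r (hsub r (pvReps_sub k1 l r hr)) t (by simp)).1 h⟩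
      · rintro ⟨r, hr, h⟩
        exact ⟨r, hr, (hagree r (hsub r (pvReps_sub k1 l r hr)) t (by simp)).2 h⟩
    split_ifs with h1 h2 h2
    · rfl
    · exact absurd (hiff.1 h1) h2
    · exact absurd (hiff.2 h2) h1
    · rfl

lemma pvGBvals_congr {κ1 κ2 : Type} [BEq κ1] [LawfulBEq κ1] [DecidableEq κ1]
    [BEq κ2] [LawfulBEq κ2] [DecidableEq κ2]
    (k1 : (Int × Int) → κ1) (k2 : (Int × Int) → κ2) (l : List (Int × Int)) (hnd : l.Nodup)
    (hagree : ∀ a ∈ l, ∀ b ∈ l, (k1 a = k1 b ↔ k2 a = k2 b)) :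
    (l.foldl (pvGBStep k1) PySem.Dict.empty).values =
      (l.foldl (pvGBStep k2) PySem.Dict.empty).values := by
  rw [pvGB_values k1 l hnd, pvGB_values k2 l hnd, ← pvReps_congr k1 k2 l hagree]
  apply List.map_congr_left
  intro r hr
  apply List.filter_congr
  intro u hu
  simp only [decide_eq_decide]
  exact hagree u hu r (pvReps_sub k1 l r hr)

theorem pv_main (T : List (Int × Int)) (hT : T.Nodup) :
    find_explosion_groups T = find_explosion_groups_alt T := by
  have hA : find_explosion_groups T =
      pyFrozensetSet ((T.foldl pvStep3
        (PySem.Dict.empty,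
          T.foldl (pvStepA T) (T.foldl (fun d t => d.insert t t) PySem.Dict.empty))).1.values) := rfl
  have hB : find_explosion_groups_alt T =
      pyFrozensetSet ((T.foldl (pvGBStep (fun t =>
        (T.foldl (pvStepOuter T) (PySem.Dict.empty, 0)).1.getD t 0)) PySem.Dict.empty).values) := rfl
  obtain ⟨hInv0, hP0⟩ := pvUp0_inv hT
  have hsound0 : ∀ a b, a ∈ T → b ∈ T →
      pvRoot T.length (pvP (T.foldl (fun d t => d.insert t t) PySem.Dict.empty)) a =
        pvRoot T.length (pvP (T.foldl (fun d t => d.insert t t) PySem.Dict.empty)) b →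
      pvConn T a b := by
    intro a b ha hb h
    rw [hP0, pvRoot_id, pvRoot_id] at h
    subst h
    exact Relation.ReflTransGen.refl
  obtain ⟨hInv1, hsound1, hmono1, hedges1⟩ := pvPhase2_spec hT T
    (T.foldl (fun d t => d.insert t t) PySem.Dict.empty) (fun x hx => hx) hInv0 hsound0
  have hAgb : (T.foldl pvStep3
      (PySem.Dict.empty,
        T.foldl (pvStepA T) (T.foldl (fun d t => d.insert t t) PySem.Dict.empty))).1 =
      T.foldl (pvGBStep (fun s =>
        pvRoot T.length (pvP (T.foldl (pvStepA T)
          (T.foldl (fun d t => d.insert t t) PySem.Dict.empty))) s)) PySem.Dict.empty :=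
    pvPhase3A hT _ T PySem.Dict.empty _ hInv1 (fun s => rfl)
  have hKAiff : ∀ a b, a ∈ T → b ∈ T →
      ((fun s => pvRoot T.length (pvP (T.foldl (pvStepA T)
          (T.foldl (fun d t => d.insert t t) PySem.Dict.empty))) s) a =
       (fun s => pvRoot T.length (pvP (T.foldl (pvStepA T)
          (T.foldl (fun d t => d.insert t t) PySem.Dict.empty))) s) b ↔ pvConn T a b) := by
    intro a b ha hb
    constructor
    · exact hsound1 a b ha hb
    · exact pvConn_imp_root (fun t ht u hu huT => hedges1 t ht u hu huT) a b
  have hWempty : pvW T PySem.Dict.empty 0 := by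
    refine ⟨?_, ?_, ?_, ?_, ?_⟩ <;> simp [PySem.Dict.keys_empty]
  obtain ⟨hWf, _, hcov⟩ := pvOuterB T PySem.Dict.empty 0 (fun x hx => hx) hWempty
  have hKBiff : ∀ a b, a ∈ T → b ∈ T →
      ((fun t => (T.foldl (pvStepOuter T) (PySem.Dict.empty, 0)).1.getD t 0) a =
       (fun t => (T.foldl (pvStepOuter T) (PySem.Dict.empty, 0)).1.getD t 0) b ↔
        pvConn T a b) := by
    intro a b ha hb
    constructor
    · intro h
      exact hWf.2.2.1 a b (hcov a ha) (hcov b hb) h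
    · exact pvConn_imp_eq
        (fun x y hx hy hadj => hWf.2.2.2.1 x y (hcov x hx) (hcov y hy) hadj) a b
  have hagree : ∀ a ∈ T, ∀ b ∈ T,
      ((fun s => pvRoot T.length (pvP (T.foldl (pvStepA T)
          (T.foldl (fun d t => d.insert t t) PySem.Dict.empty))) s) a =
       (fun s => pvRoot T.length (pvP (T.foldl (pvStepA T)
          (T.foldl (fun d t => d.insert t t) PySem.Dict.empty))) s) b ↔
       (fun t => (T.foldl (pvStepOuter T) (PySem.Dict.empty, 0)).1.getD t 0) a =
       (fun t => (T.foldl (pvStepOuter T) (PySem.Dict.empty, 0)).1.getD t 0) b) :=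
    fun a ha b hb => (hKAiff a b ha hb).trans (hKBiff a b ha hb).symm
  have hvals := pvGBvals_congr _ _ T hT hagree
  rw [hA, hB, hAgb, hvals]

-- ===== VERDICT (by name: the statement is the Claim_ definition above) =====
theorem find_explosion_groups_spec : Claim_equal_find_explosion_groups := by
  intro targets hDom hPre
  unfold Spec_find_explosion_groups
  exact pv_main targets hPre
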